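-- pv_equiv track=rewrite | github.com/koguz/Tartarus | analyze_communities.py | compute_dwell_times
-- ===== SOURCE A (Python) =====
-- from collections import defaultdict, Counter
--
-- def compute_dwell_times(sequences, state_to_community):
--     """
--     Compute how long the agent stays in each community before exiting.
--     Returns dict: community_id -> list of dwell times (in steps)
--     """
--     dwell_times = defaultdict(list)
--
--     for seq in sequences:
--         if len(seq) < 2:
--             continue
--
--         # Track current community and entry time
--         current_comm = state_to_community.get(seq[0])
--         entry_time = 0
--
--         for t, state in enumerate(seq[1:], 1):
--             comm = state_to_community.get(state)
--             if comm != current_comm: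
--                 # Exited the community
--                 if current_comm is not None:
--                     dwell_time = t - entry_time
--                     dwell_times[current_comm].append(dwell_time)
--                 current_comm = comm
--                 entry_time = t
--
--         # Handle final segment (may not have exited)
--         # Don't count incomplete dwells at the end
--
--     return dwell_times
-- ===== SOURCE B (Python) =====
-- from collections import defaultdict
--
--
-- def _rle(xs):
--     """Run-length-encode xs into a list of (value, run_length) pairs."""
--     if not xs:
--         return []
--     runs = []
--     cur, n = xs[0], 1
--     for x in xs[1:]:
--         if x == cur:
--             n += 1
--         else:
--             runs.append((cur, n))
--             cur, n = x, 1
--     runs.append((cur, n))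
--     return runs
--
--
-- def compute_dwell_times(sequences, state_to_community):
--     """
--     Compute how long the agent stays in each community before exiting.
--     Returns dict: community_id -> list of dwell times (in steps)
--     """
--     dwell_times = defaultdict(list)
--     for seq in sequences:
--         runs = _rle([state_to_community.get(s) for s in seq])
--         # the final run is an unterminated dwell: drop it
--         for comm, length in runs[:-1]:
--             if comm is not None:
--                 dwell_times[comm].append(length)
--     return dwell_times
-- ===== Notes on version B (the rewrite author's own statement) =====
-- stated objective: alternative
-- what changed: Replaced A's per-step current-community/entry-time state machine with a two-phase decomposition: run-length-encode the mapped community sequence, then append the lengths of all non-None runs except the unterminated last one.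
import Mathlib
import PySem

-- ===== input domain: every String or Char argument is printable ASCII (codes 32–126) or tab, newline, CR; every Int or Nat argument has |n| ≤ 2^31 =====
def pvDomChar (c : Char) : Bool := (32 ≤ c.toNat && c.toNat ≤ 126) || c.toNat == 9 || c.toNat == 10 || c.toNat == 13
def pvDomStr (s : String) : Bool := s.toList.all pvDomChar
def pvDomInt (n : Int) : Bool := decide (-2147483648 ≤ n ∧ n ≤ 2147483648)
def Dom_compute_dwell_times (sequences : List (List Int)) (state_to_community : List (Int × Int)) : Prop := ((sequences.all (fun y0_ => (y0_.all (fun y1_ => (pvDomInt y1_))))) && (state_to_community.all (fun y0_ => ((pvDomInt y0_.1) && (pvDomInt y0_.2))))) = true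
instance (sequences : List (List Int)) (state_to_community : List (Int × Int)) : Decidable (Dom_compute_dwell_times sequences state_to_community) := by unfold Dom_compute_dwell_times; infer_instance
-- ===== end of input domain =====

-- B replaces A's current-community/entry-time state machine by run-length-encoding the
-- community sequence and iterating over all runs but the last (objective: alternative, same cost).

-- ===== PORT A =====
-- inner loop body of A: state = (dwell_times, current_comm, entry_time), input = (t, state)
def pvStepA (m : PySem.Dict Int Int) (acc : PySem.Dict Int (List Int) × Option Int × Int)
    (tx : Int × Int) : PySem.Dict Int (List Int) × Option Int × Int :=
  let comm := m.get? tx.2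
  if comm ≠ acc.2.1 then
    (match acc.2.1 with
     | some c => acc.1.modify c [] (· ++ [tx.1 - acc.2.2])  -- dwell_times[current_comm].append(t - entry_time)
     | none => acc.1,
     comm, tx.1)
  else acc

def compute_dwell_times (sequences : List (List Int)) (state_to_community : List (Int × Int)) : List (Int × List Int) :=
  let m := PySem.Dict.ofList state_to_community
  (sequences.foldl (fun d seq =>
      if seq.length < 2 then d
      else
        -- seq[0] via headI (exact: length ≥ 2 here); seq[1:] = seq.tail; enumerate(seq[1:], 1)
        ((PySem.List.enumerate seq.tail 1).foldl (pvStepA m) (d, m.get? seq.headI, 0)).1)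
    PySem.Dict.empty).items

-- ===== PORT B =====
-- _rle's inner loop: cur/n accumulator over the rest of the list
def pvGo (cur : Option Int) (n : Int) : List (Option Int) → List (Option Int × Int)
  | [] => [(cur, n)]
  | x :: xs => if x = cur then pvGo cur (n + 1) xs else (cur, n) :: pvGo x 1 xs

def pvRle : List (Option Int) → List (Option Int × Int)
  | [] => []
  | x :: xs => pvGo x 1 xs

-- body of B's 'for comm, length in runs[:-1]'
def pvStepB (d : PySem.Dict Int (List Int)) (cn : Option Int × Int) : PySem.Dict Int (List Int) :=
  match cn.1 with
  | some c => d.modify c [] (· ++ [cn.2])  -- dwell_times[comm].append(length)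
  | none => d

def compute_dwell_times_alt (sequences : List (List Int)) (state_to_community : List (Int × Int)) : List (Int × List Int) :=
  let m := PySem.Dict.ofList state_to_community
  (sequences.foldl (fun d seq =>
      ((pvRle (seq.map (fun s => m.get? s))).dropLast).foldl pvStepB d)
    PySem.Dict.empty).items

-- ===== PRECONDITION & SPEC =====
def Spec_compute_dwell_times (sequences : List (List Int)) (state_to_community : List (Int × Int)) (out : List (Int × List Int)) : Prop := out = compute_dwell_times_alt sequences state_to_community
instance (sequences : List (List Int)) (state_to_community : List (Int × Int)) (out : List (Int × List Int)) : Decidable (Spec_compute_dwell_times sequences state_to_community out) := by unfold Spec_compute_dwell_times; infer_instance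

-- ===== CLAIM (what is proved, stated in full; the proofs are below) =====
def Claim_equal_compute_dwell_times : Prop := ∀ (sequences : List (List Int)) (state_to_community : List (Int × Int)), Dom_compute_dwell_times sequences state_to_community → Spec_compute_dwell_times sequences state_to_community (compute_dwell_times sequences state_to_community)

-- ===== LEMMAS AND PROOFS =====

lemma pvGo_ne_nil (cur : Option Int) (n : Int) (xs : List (Option Int)) : pvGo cur n xs ≠ [] := by
  induction xs generalizing cur n with
  | nil => simp [pvGo]
  | cons x xs ih =>
    simp only [pvGo]
    split
    · exact ih _ _
    · simp

-- A's state machine over the tail (indices from t, run entered at index `entry`)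
-- equals B's fold over the completed runs of pvGo started with run length t - entry.
lemma loop_eq (m : PySem.Dict Int Int) (xs : List Int) :
    ∀ (cur : Option Int) (entry t : Int) (d : PySem.Dict Int (List Int)),
    ((PySem.List.enumerate xs t).foldl (pvStepA m) (d, cur, entry)).1
      = ((pvGo cur (t - entry) (xs.map (fun s => m.get? s))).dropLast).foldl pvStepB d := by
  induction xs with
  | nil => intro cur entry t d; simp [pvGo, PySem.List.enumerate]
  | cons x xs ih =>
    intro cur entry t d
    rw [PySem.List.enumerate_cons]
    simp only [List.foldl_cons, List.map_cons, pvGo]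
    by_cases h : m.get? x = cur
    · have : pvStepA m (d, cur, entry) (t, x) = (d, cur, entry) := by
        simp [pvStepA, h]
      rw [this, ih cur entry (t + 1) d, if_pos h,
        show t - entry + 1 = t + 1 - entry by ring]
    · have hstep : pvStepA m (d, cur, entry) (t, x)
          = (pvStepB d (cur, t - entry), m.get? x, t) := by
        simp only [pvStepA, pvStepB]
        rw [if_pos (by simpa using h)]
      rw [hstep, ih (m.get? x) t (t + 1) (pvStepB d (cur, t - entry)), if_neg h,
        List.dropLast_cons_of_ne_nil (pvGo_ne_nil _ _ _), List.foldl_cons,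
        show t + 1 - t = (1 : Int) by ring]

lemma body_eq (m : PySem.Dict Int Int) (d : PySem.Dict Int (List Int)) (seq : List Int) :
    (if seq.length < 2 then d
     else ((PySem.List.enumerate seq.tail 1).foldl (pvStepA m) (d, m.get? seq.headI, 0)).1)
      = ((pvRle (seq.map (fun s => m.get? s))).dropLast).foldl pvStepB d := by
  match seq with
  | [] => simp [pvRle]
  | [a] => simp [pvRle, pvGo]
  | a :: b :: rest =>
    rw [if_neg (by simp)]
    show ((PySem.List.enumerate (b :: rest) 1).foldl (pvStepA m) (d, m.get? a, 0)).1 = _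
    rw [loop_eq]
    norm_num [pvRle]

-- ===== VERDICT (by name: the statement is the Claim_ definition above) =====
theorem compute_dwell_times_spec : Claim_equal_compute_dwell_times := by
  intro sequences state_to_community _
  show compute_dwell_times _ _ = compute_dwell_times_alt _ _
  simp only [compute_dwell_times, compute_dwell_times_alt]
  congr 1
  exact PySem.List.foldl_congr_mem _ _ _ _ (fun d seq _ => body_eq _ d seq)
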